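-- pv_equiv track=rewrite | github.com/oakthyago/genetic_algorithm_tsp_TC2 | genetic_algorithm.py | prioritize_priority_cities
-- ===== SOURCE A (Python) =====
-- def prioritize_priority_cities(individual, priority_city_indices):
--     """
--     Em cada rota (lista de índices), mantém o depósito na posição 0 e
--     move as cidades priorizadas para o início da rota (após o depósito),
--     preservando a ordem relativa dentro de cada grupo.
--     """
--     fixed = []
--     for route in individual:
--         if not route:
--             fixed.append(route)
--             continue
--         depot = route[0]
--         tail = route[1:]
--         pri = [c for c in tail if isinstance(c, int) and c in priority_city_indices]
--         non = [c for c in tail if isinstance(c, int) and c not in priority_city_indices]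
--         fixed.append([depot] + pri + non)
--     return fixed
-- ===== SOURCE B (Python) =====
-- def prioritize_priority_cities(individual, priority_city_indices):
--     """Stable sort each tail by the boolean key 'not a priority city':
--     priority cities (key False) come first, original relative order kept."""
--     def fix(route):
--         if not route:
--             return route
--         tail = [c for c in route[1:] if isinstance(c, int)]
--         return [route[0]] + sorted(tail, key=lambda c: c not in priority_city_indices)
--     return [fix(route) for route in individual]
-- ===== Notes on version B (the rewrite author's own statement) =====
-- stated objective: idiomatic
-- what changed: Replaces the two filtering passes that build pri/non lists per route with a single stable sort of the tail keyed on non-membership in priority_city_indices (plus a map instead of an accumulator loop).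
import Mathlib
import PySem

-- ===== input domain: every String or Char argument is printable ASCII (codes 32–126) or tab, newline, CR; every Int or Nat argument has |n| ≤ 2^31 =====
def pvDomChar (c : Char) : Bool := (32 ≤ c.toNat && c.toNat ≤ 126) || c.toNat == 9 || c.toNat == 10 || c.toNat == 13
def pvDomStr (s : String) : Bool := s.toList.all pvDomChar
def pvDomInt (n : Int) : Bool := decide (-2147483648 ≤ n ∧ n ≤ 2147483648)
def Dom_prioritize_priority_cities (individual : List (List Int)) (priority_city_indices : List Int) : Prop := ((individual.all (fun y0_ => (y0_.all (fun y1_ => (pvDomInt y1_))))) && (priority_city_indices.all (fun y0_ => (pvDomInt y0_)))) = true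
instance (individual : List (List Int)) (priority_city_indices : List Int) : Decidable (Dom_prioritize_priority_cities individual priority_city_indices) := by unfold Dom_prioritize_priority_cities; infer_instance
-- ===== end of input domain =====

-- ===== PORT A =====
-- Header: B replaces A's two per-route filtering passes by one stable sort of the
-- tail keyed on non-membership in the priority list (idiomatic, same results).
-- Port of A. 'isinstance(c, int)' is always true under the type convention
-- (every element is an Int), so the filters keep exactly the membership test.
def prioritize_priority_cities (individual : List (List Int)) (priority_city_indices : List Int) : List (List Int) :=
  individual.foldl
    (fun fixed route =>
      match route with
      | [] => fixed ++ [route]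
      | depot :: tail =>
          let pri := tail.filter (fun c => decide (c ∈ priority_city_indices))
          let non := tail.filter (fun c => decide (c ∉ priority_city_indices))
          fixed ++ [[depot] ++ pri ++ non])
    []

-- ===== PORT B =====
-- Port of B: stable sort (PySem.List.sorted) with the Python bool key
-- 'c not in priority_city_indices' rendered as 0/1 (False < True).
def prioritize_priority_cities_alt (individual : List (List Int)) (priority_city_indices : List Int) : List (List Int) :=
  individual.map
    (fun route =>
      match route with
      | [] => route
      | depot :: tail =>
          [depot] ++ PySem.List.sorted tail
            (fun c => if c ∈ priority_city_indices then (0 : Int) else 1) false)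

-- ===== PRECONDITION & SPEC =====
def Spec_prioritize_priority_cities (individual : List (List Int)) (priority_city_indices : List Int) (out : List (List Int)) : Prop := out = prioritize_priority_cities_alt individual priority_city_indices
instance (individual : List (List Int)) (priority_city_indices : List Int) (out : List (List Int)) : Decidable (Spec_prioritize_priority_cities individual priority_city_indices out) := by unfold Spec_prioritize_priority_cities; infer_instance

-- ===== CLAIM (what is proved, stated in full; the proofs are below) =====
def Claim_equal_prioritize_priority_cities : Prop := ∀ (individual : List (List Int)) (priority_city_indices : List Int), Dom_prioritize_priority_cities individual priority_city_indices → Spec_prioritize_priority_cities individual priority_city_indices (prioritize_priority_cities individual priority_city_indices)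

-- ===== LEMMAS AND PROOFS =====

-- insertBy passes over a block whose elements all refuse 'before'
theorem insertBy_append_not {a : Type} (before : a -> a -> Bool) (x : a) (A B : List a)
    (h : forall y, y ∈ A -> before x y = false) :
    PySem.List.insertBy before x (A ++ B) = A ++ PySem.List.insertBy before x B := by
  induction A with
  | nil => rfl
  | cons a t ih =>
      have ha : before x a = false := h a (by simp)
      simp only [List.cons_append, PySem.List.insertBy, ha, Bool.false_eq_true, if_false]
      rw [ih (fun y hy => h y (by simp [hy]))]

-- insertBy appends at the end when every element refuses 'before'
theorem insertBy_end {a : Type} (before : a -> a -> Bool) (x : a) (B : List a)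
    (h : forall y, y ∈ B -> before x y = false) :
    PySem.List.insertBy before x B = B ++ [x] := by
  induction B with
  | nil => rfl
  | cons b bt ih =>
      have hb : before x b = false := h b (by simp)
      simp only [PySem.List.insertBy, hb, Bool.false_eq_true, if_false, List.cons_append]
      rw [ih (fun y hy => h y (by simp [hy]))]

-- a stable insertion sort with a {0,1}-valued key is exactly 'zeros then ones'
theorem sorted_two_valued (p : List Int) (tail : List Int) :
    PySem.List.sorted tail (fun c => if c ∈ p then (0 : Int) else 1) false =
      tail.filter (fun c => decide (c ∈ p)) ++ tail.filter (fun c => decide (c ∉ p)) := by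
  let key : Int -> Int := fun c => if c ∈ p then (0 : Int) else 1
  rw [PySem.List.sorted_eq_foldl_insertBy]
  suffices h : forall (acc A B : List Int),
      acc = A ++ B ->
      (forall y, y ∈ A -> key y = 0) -> (forall y, y ∈ B -> key y = 1) ->
      tail.foldl (fun acc x => PySem.List.insertBy (fun a b => decide (key a < key b)) x acc) acc =
        (A ++ tail.filter (fun c => decide (c ∈ p))) ++ (B ++ tail.filter (fun c => decide (c ∉ p))) by
    simpa using h [] [] [] rfl (by simp) (by simp)
  induction tail with
  | nil => intro acc A B hacc _ _; simp [hacc]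
  | cons x t ih =>
      intro acc A B hacc hA hB
      by_cases hx : x ∈ p
      · have hkey : key x = 0 := by simp [key, hx]
        have step : PySem.List.insertBy (fun a b => decide (key a < key b)) x acc
            = (A ++ [x]) ++ B := by
          rw [hacc, insertBy_append_not _ _ A B
            (fun y hy => by simp [hkey, hA y hy])]
          cases B with
          | nil => simp [PySem.List.insertBy]
          | cons b bt =>
              have : key b = 1 := hB b (by simp)
              simp [PySem.List.insertBy, hkey, this]
        simp only [List.foldl_cons, step]
        rw [ih ((A ++ [x]) ++ B) (A ++ [x]) B rfl
          (fun y hy => by rcases List.mem_append.1 hy with h | h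
                          · exact hA y h
                          · simp at h; simp [h, hkey])
          hB]
        simp [hx]
      · have hkey : key x = 1 := by simp [key, hx]
        have step : PySem.List.insertBy (fun a b => decide (key a < key b)) x acc
            = A ++ (B ++ [x]) := by
          rw [hacc, insertBy_append_not _ _ A B
            (fun y hy => by simp [hkey, hA y hy]),
            insertBy_end _ _ B (fun y hy => by simp [hkey, hB y hy])]
        simp only [List.foldl_cons, step]
        rw [ih (A ++ (B ++ [x])) A (B ++ [x]) rfl hA
          (fun y hy => by rcases List.mem_append.1 hy with h | h
                          · exact hB y h
                          · simp at h; simp [h, hkey])]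
        simp [hx]

-- A's accumulator loop, run from any accumulator, is B's map
theorem foldlA_eq (p : List Int) (l : List (List Int)) (acc : List (List Int)) :
    List.foldl
      (fun fixed route =>
        match route with
        | [] => fixed ++ [route]
        | depot :: tail =>
            let pri := tail.filter (fun c => decide (c ∈ p))
            let non := tail.filter (fun c => decide (c ∉ p))
            fixed ++ [[depot] ++ pri ++ non])
      acc l
    = acc ++ l.map
        (fun route =>
          match route with
          | [] => route
          | depot :: tail =>
              [depot] ++ PySem.List.sorted tail
                (fun c => if c ∈ p then (0 : Int) else 1) false) := by
  induction l generalizing acc with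
  | nil => simp
  | cons r t ih =>
      rw [List.foldl_cons, ih]
      cases r with
      | nil => simp
      | cons d tl => simp [sorted_two_valued]

-- ===== VERDICT (by name: the statement is the Claim_ definition above) =====
theorem prioritize_priority_cities_spec : Claim_equal_prioritize_priority_cities := by
  intro individual priority_city_indices _
  unfold Spec_prioritize_priority_cities prioritize_priority_cities prioritize_priority_cities_alt
  simpa using foldlA_eq priority_city_indices individual []
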